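-- pv_equiv track=rewrite | github.com/Zeek6012/DND-Spell_Lookup | app.py | render_desc_with_extra_blank_lines
-- ===== SOURCE A (Python) =====
-- def render_desc_with_extra_blank_lines(text: str) -> str:
--     if text is None:
--         return ""
--     lines = str(text).splitlines()
--     out = []
--     blank_run = 0
--     for line in lines:
--         if line.strip() == "":
--             blank_run += 1
--             if blank_run == 1:
--                 out.append("")
--             else:
--                 out.append("&nbsp;")
--         else:
--             blank_run = 0
--             out.append(line)
--     return "\n".join(out)
-- ===== SOURCE B (Python) =====
-- def render_desc_with_extra_blank_lines(text: str) -> str: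
--     # Run-based rewrite: scan blank runs as whole blocks instead of keeping a
--     # blank_run counter per line.
--     if text is None:
--         return ""
--     lines = str(text).splitlines()
--     out = []
--     i, n = 0, len(lines)
--     while i < n:
--         if lines[i].strip() == "":
--             j = i + 1
--             while j < n and lines[j].strip() == "":
--                 j += 1
--             out.append("")
--             out.extend(["&nbsp;"] * (j - i - 1))
--             i = j
--         else:
--             out.append(lines[i])
--             i += 1
--     return "\n".join(out)
-- ===== Notes on version B (the rewrite author's own statement) =====
-- stated objective: alternative
-- what changed: Replaces the per-line blank_run counter state machine by a run-based scan that consumes each maximal blank run at once and emits one empty marker plus the remaining nbsp placeholder lines as a block.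
import Mathlib
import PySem

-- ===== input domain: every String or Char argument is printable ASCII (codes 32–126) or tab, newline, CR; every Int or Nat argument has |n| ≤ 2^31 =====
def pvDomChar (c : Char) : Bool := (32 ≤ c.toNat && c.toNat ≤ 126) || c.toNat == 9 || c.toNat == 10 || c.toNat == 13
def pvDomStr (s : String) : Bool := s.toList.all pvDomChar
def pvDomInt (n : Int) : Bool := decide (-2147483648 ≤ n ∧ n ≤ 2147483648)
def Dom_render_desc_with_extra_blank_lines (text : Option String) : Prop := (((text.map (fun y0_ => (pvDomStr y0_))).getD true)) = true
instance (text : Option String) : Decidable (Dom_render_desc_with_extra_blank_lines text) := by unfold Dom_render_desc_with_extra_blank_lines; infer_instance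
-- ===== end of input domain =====

-- B replaces A's per-line blank_run counter by a run-based scan that consumes each
-- maximal blank run at once (objective: alternative decomposition, same cost).

-- ===== PORT A =====
-- the loop body: state = (out, blank_run)
def pvAStep (st : List String × Int) (line : String) : List String × Int :=
  if PySem.Str.strip line = "" then
    let br := st.2 + 1
    (st.1 ++ [if br = 1 then "" else "&nbsp;"], br)
  else
    (st.1 ++ [line], 0)

def render_desc_with_extra_blank_lines (text : Option String) : String :=
  match text with
  | none => ""
  | some t =>
    let lines := PySem.Str.splitlines t
    let st := lines.foldl pvAStep ([], 0)
    PySem.Str.join "\n" st.1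

-- ===== PORT B =====
-- run-based scan: a blank line starts a whole blank run (inner while = takeWhile/dropWhile)
def pvBGo : List String → List String
  | [] => []
  | l :: ls =>
    if PySem.Str.strip l = "" then
      let run := ls.takeWhile (fun x => PySem.Str.strip x == "")
      ("" :: List.replicate run.length "&nbsp;")
        ++ pvBGo (ls.dropWhile (fun x => PySem.Str.strip x == ""))
    else
      l :: pvBGo ls
termination_by ls => ls.length
decreasing_by
  · exact Nat.lt_succ_of_le (List.length_dropWhile_le _ _)
  · exact Nat.lt_succ_self _

def render_desc_with_extra_blank_lines_alt (text : Option String) : String :=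
  match text with
  | none => ""
  | some t => PySem.Str.join "\n" (pvBGo (PySem.Str.splitlines t))

-- ===== PRECONDITION & SPEC =====
def Spec_render_desc_with_extra_blank_lines (text : Option String) (out : String) : Prop := out = render_desc_with_extra_blank_lines_alt text
instance (text : Option String) (out : String) : Decidable (Spec_render_desc_with_extra_blank_lines text out) := by unfold Spec_render_desc_with_extra_blank_lines; infer_instance

-- ===== CLAIM (what is proved, stated in full; the proofs are below) =====
def Claim_equal_render_desc_with_extra_blank_lines : Prop := ∀ (text : Option String), Dom_render_desc_with_extra_blank_lines text → Spec_render_desc_with_extra_blank_lines text (render_desc_with_extra_blank_lines text)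

-- ===== LEMMAS AND PROOFS =====

-- loop invariant: A's fold from state (acc, br) emits exactly B's run decomposition;
-- with br ≥ 1 the pending blank run continues, so leading blanks become "&nbsp;".
theorem pvFold_eq (lines : List String) : ∀ (acc : List String) (br : ℤ), 0 ≤ br →
    (lines.foldl pvAStep (acc, br)).1 =
      if br = 0 then acc ++ pvBGo lines
      else acc ++ List.replicate (lines.takeWhile (fun x => PySem.Str.strip x == "")).length "&nbsp;"
             ++ pvBGo (lines.dropWhile (fun x => PySem.Str.strip x == "")) := by
  induction lines with
  | nil =>
    intro acc br _
    split_ifs <;> simp [pvBGo]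
  | cons l ls ih =>
    intro acc br hbr
    by_cases hb : PySem.Str.strip l = ""
    · -- blank line
      rcases eq_or_lt_of_le hbr with h0 | h1
      · -- br = 0 : first blank of a run, emit ""
        obtain rfl : br = 0 := h0.symm
        have hstep : pvAStep (acc, 0) l = (acc ++ [""], 1) := by
          simp [pvAStep, hb]
        rw [List.foldl_cons, hstep, ih (acc ++ [""]) 1 (by norm_num)]
        simp [pvBGo, hb]
      · -- br ≥ 1 : continuation, emit "&nbsp;"
        have hne : br + 1 ≠ 1 := by omega
        have hne0 : br ≠ 0 := by omega
        have hstep : pvAStep (acc, br) l = (acc ++ ["&nbsp;"], br + 1) := by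
          simp [pvAStep, hb]; exact hne0
        rw [List.foldl_cons, hstep, ih (acc ++ ["&nbsp;"]) (br + 1) (by omega),
          if_neg (by omega : br + 1 ≠ 0), if_neg hne0]
        simp [hb, List.replicate_succ]
    · -- non-blank line: counter resets to 0 in A; B continues plainly
      have hstep : pvAStep (acc, br) l = (acc ++ [l], 0) := by
        simp [pvAStep, hb]
      rw [List.foldl_cons, hstep, ih (acc ++ [l]) 0 le_rfl, if_pos rfl]
      rcases eq_or_lt_of_le hbr with h0 | h1
      · obtain rfl : br = 0 := h0.symm
        simp [pvBGo, hb]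
      · rw [if_neg (by omega : br ≠ 0)]
        simp [hb, pvBGo]

-- ===== VERDICT (by name: the statement is the Claim_ definition above) =====
theorem render_desc_with_extra_blank_lines_spec : Claim_equal_render_desc_with_extra_blank_lines := by
  intro text _
  unfold Spec_render_desc_with_extra_blank_lines
  cases text with
  | none => rfl
  | some t =>
    simp only [render_desc_with_extra_blank_lines, render_desc_with_extra_blank_lines_alt]
    rw [pvFold_eq _ [] 0 le_rfl]
    simp
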